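-- pv_equiv track=rewrite | github.com/jallilavanya/problems.md | MinimizeLoss.py | minimize_loss
-- ===== SOURCE A (Python) =====
-- def minimize_loss(prices):
--     n = len(prices)
--     min_loss = float('inf')
--
--     for i in range(n):
--         for j in range(i+1, n):
--             if prices[i] > prices[j]:
--                 loss = prices[i] - prices[j]
--                 if loss < min_loss:
--                     min_loss = loss
--
--     return min_loss if min_loss != float('inf') else 0
-- ===== SOURCE B (Python) =====
-- def minimize_loss(prices):
--     sp = sorted((p, i) for i, p in enumerate(prices))
--     best = None
--     for (pj, j), (pi, i) in zip(sp, sp[1:]):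
--         if pi > pj and i < j:
--             loss = pi - pj
--             if best is None or loss < best:
--                 best = loss
--     return 0 if best is None else best
-- ===== Notes on version B (the rewrite author's own statement) =====
-- stated objective: faster
-- what changed: Replaced the all-pairs double loop with a sort of (price, index) pairs followed by a single scan of adjacent sorted pairs (a candidate only when the larger price has the smaller index), which yields the same minimum positive loss.
import Mathlib
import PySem

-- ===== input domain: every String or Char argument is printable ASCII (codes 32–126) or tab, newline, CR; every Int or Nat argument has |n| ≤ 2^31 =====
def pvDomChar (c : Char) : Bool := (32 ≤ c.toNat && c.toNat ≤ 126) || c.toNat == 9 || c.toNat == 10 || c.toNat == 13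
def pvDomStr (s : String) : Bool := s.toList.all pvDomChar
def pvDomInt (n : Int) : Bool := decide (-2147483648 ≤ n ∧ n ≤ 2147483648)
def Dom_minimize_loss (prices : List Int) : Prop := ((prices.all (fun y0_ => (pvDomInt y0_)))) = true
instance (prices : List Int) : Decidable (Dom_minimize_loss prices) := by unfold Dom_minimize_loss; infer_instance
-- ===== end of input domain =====

-- B replaces A's O(n^2) all-pairs scan by sorting (price, index) pairs and scanning adjacent sorted pairs (O(n log n)); return values are identical.

-- ===== PORT A =====
-- min_loss = float('inf') is modelled as `none`; every loss compares below it, exactly as in Python.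
-- indices produced by range(...) are always in bounds, so pyGetD with default 0 is exact here.
def minimize_loss (prices : List Int) : Int :=
  let n : Int := prices.length
  let min_loss : Option Int :=
    (PySem.List.pyRange 0 n 1).foldl (fun acc i =>
      (PySem.List.pyRange (i + 1) n 1).foldl (fun acc2 j =>
        if PySem.List.pyGetD prices i 0 > PySem.List.pyGetD prices j 0 then
          let loss := PySem.List.pyGetD prices i 0 - PySem.List.pyGetD prices j 0
          match acc2 with
          | none => some loss
          | some m => if loss < m then some loss else some m
        else acc2) acc) none
  match min_loss with
  | none => 0
  | some m => m

-- ===== PORT B =====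
-- `(p, i) for i, p in enumerate(prices)`
def pvEnumPairs : List Int → Int → List (Int × Int)
  | [], _ => []
  | p :: rest, k => (p, k) :: pvEnumPairs rest (k + 1)

-- Python's sorted() on pairs: stable sort by lexicographic tuple order (indices are distinct,
-- so the lexicographic order is total here and mergeSort produces exactly sorted()'s output).
def pvLexLe (x y : Int × Int) : Bool := x.1 < y.1 || (x.1 == y.1 && x.2 ≤ y.2)

def minimize_loss_alt (prices : List Int) : Int :=
  let sp := (pvEnumPairs prices 0).mergeSort pvLexLe
  let best : Option Int :=
    (sp.zip sp.tail).foldl (fun acc wv =>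
      if wv.2.1 > wv.1.1 && wv.2.2 < wv.1.2 then
        let loss := wv.2.1 - wv.1.1
        match acc with
        | none => some loss
        | some b => if loss < b then some loss else some b
      else acc) none
  match best with
  | none => 0
  | some b => b

-- ===== PRECONDITION & SPEC =====
def Spec_minimize_loss (prices : List Int) (out : Int) : Prop := out = minimize_loss_alt prices
instance (prices : List Int) (out : Int) : Decidable (Spec_minimize_loss prices out) := by unfold Spec_minimize_loss; infer_instance

-- ===== CLAIM (what is proved, stated in full; the proofs are below) =====
def Claim_equal_minimize_loss : Prop := ∀ (prices : List Int), Dom_minimize_loss prices → Spec_minimize_loss prices (minimize_loss prices)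

-- ===== LEMMAS AND PROOFS =====

def pvStep (acc : Option Int) (v : Int) : Option Int :=
  match acc with
  | none => some v
  | some m => if v < m then some v else some m

def pvOptMin (a : Option Int) (xs : List Int) : Option Int := xs.foldl pvStep a

def pvFromOpt : Option Int → Int
  | none => 0
  | some m => m

def pvLA (prices : List Int) : List Int :=
  (PySem.List.pyRange 0 (prices.length : Int) 1).flatMap (fun i =>
    (PySem.List.pyRange (i + 1) (prices.length : Int) 1).filterMap (fun j =>
      if PySem.List.pyGetD prices i 0 > PySem.List.pyGetD prices j 0 then
        some (PySem.List.pyGetD prices i 0 - PySem.List.pyGetD prices j 0)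
      else none))

def pvSp (prices : List Int) : List (Int × Int) := (pvEnumPairs prices 0).mergeSort pvLexLe

def pvLB (prices : List Int) : List Int :=
  ((pvSp prices).zip (pvSp prices).tail).filterMap (fun wv =>
    if wv.2.1 > wv.1.1 && wv.2.2 < wv.1.2 then some (wv.2.1 - wv.1.1) else none)

def IsLoss (prices : List Int) (x : Int) : Prop :=
  ∃ i j : ℕ, i < j ∧ j < prices.length ∧ prices.getD i 0 > prices.getD j 0 ∧
    x = prices.getD i 0 - prices.getD j 0

lemma pv_foldl_guard {α : Type} (c : α → Prop) [DecidablePred c] (g : α → Int)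
    (l : List α) (a : Option Int) :
    l.foldl (fun acc x => if c x then pvStep acc (g x) else acc) a
      = pvOptMin a (l.filterMap (fun x => if c x then some (g x) else none)) := by
  induction l generalizing a with
  | nil => rfl
  | cons x l ih =>
    by_cases h : c x <;> simp [h, ih, pvOptMin]

lemma pv_foldl_optMin {α : Type} (l : List α) (f : α → List Int) (a : Option Int) :
    l.foldl (fun acc x => pvOptMin acc (f x)) a = pvOptMin a (l.flatMap f) := by
  induction l generalizing a with
  | nil => rfl
  | cons x l ih =>
    simp only [List.foldl_cons, List.flatMap_cons]
    rw [ih]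
    simp [pvOptMin, List.foldl_append]

lemma minimize_loss_eq (prices : List Int) :
    minimize_loss prices = pvFromOpt (pvOptMin none (pvLA prices)) := by
  have h1 : ∀ (i : Int) (acc : Option Int),
      (PySem.List.pyRange (i + 1) (prices.length : Int) 1).foldl (fun acc2 j =>
        if PySem.List.pyGetD prices i 0 > PySem.List.pyGetD prices j 0 then
          pvStep acc2 (PySem.List.pyGetD prices i 0 - PySem.List.pyGetD prices j 0)
        else acc2) acc
      = pvOptMin acc ((PySem.List.pyRange (i + 1) (prices.length : Int) 1).filterMap (fun j =>
          if PySem.List.pyGetD prices i 0 > PySem.List.pyGetD prices j 0 then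
            some (PySem.List.pyGetD prices i 0 - PySem.List.pyGetD prices j 0)
          else none)) :=
    fun i acc => pv_foldl_guard _ _ _ _
  show pvFromOpt ((PySem.List.pyRange 0 (prices.length : Int) 1).foldl (fun acc i =>
      (PySem.List.pyRange (i + 1) (prices.length : Int) 1).foldl (fun acc2 j =>
        if PySem.List.pyGetD prices i 0 > PySem.List.pyGetD prices j 0 then
          pvStep acc2 (PySem.List.pyGetD prices i 0 - PySem.List.pyGetD prices j 0)
        else acc2) acc) none) = _
  simp only [h1]
  rw [pv_foldl_optMin]
  rfl

lemma minimize_loss_alt_eq (prices : List Int) :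
    minimize_loss_alt prices = pvFromOpt (pvOptMin none (pvLB prices)) := by
  show pvFromOpt (((pvSp prices).zip (pvSp prices).tail).foldl (fun acc wv =>
      if wv.2.1 > wv.1.1 && wv.2.2 < wv.1.2 then pvStep acc (wv.2.1 - wv.1.1) else acc) none) = _
  rw [pv_foldl_guard (fun wv : (Int × Int) × (Int × Int) => (wv.2.1 > wv.1.1 && wv.2.2 < wv.1.2 : Bool) = true)]
  rfl

lemma pvOptMin_some (xs : List Int) (m : Int) :
    pvOptMin (some m) xs = some (xs.foldl min m) := by
  induction xs generalizing m with
  | nil => rfl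
  | cons x xs ih =>
    have : pvStep (some m) x = some (min m x) := by
      simp only [pvStep, min_def]
      split_ifs <;> first | rfl | omega
    simp only [pvOptMin, List.foldl_cons, this] at *
    rw [ih]

lemma pvOptMin_eq_min? (xs : List Int) : pvOptMin none xs = xs.min? := by
  cases xs with
  | nil => rfl
  | cons x xs =>
    have h : pvOptMin (some x) xs = some (xs.foldl min x) := pvOptMin_some xs x
    simp only [pvOptMin, List.foldl_cons, pvStep] at *
    rw [h]
    simp [List.min?]

lemma pv_min?_congr (A B : List Int) (h1 : ∀ b ∈ B, b ∈ A)
    (h2 : ∀ a ∈ A, ∃ b ∈ B, b ≤ a) : A.min? = B.min? := by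
  cases hA : A.min? with
  | none =>
    rw [List.min?_eq_none_iff] at hA
    subst hA
    have : B = [] := by
      cases B with
      | nil => rfl
      | cons b B => exact absurd (h1 b (by simp)) (by simp)
    simp [this]
  | some a =>
    rw [List.min?_eq_some_iff] at hA
    obtain ⟨haA, hamin⟩ := hA
    obtain ⟨b0, hb0B, hb0⟩ := h2 a haA
    cases hB : B.min? with
    | none =>
      rw [List.min?_eq_none_iff] at hB
      subst hB
      simp at hb0B
    | some b =>
      rw [List.min?_eq_some_iff] at hB
      obtain ⟨hbB, hbmin⟩ := hB
      have h1' : a ≤ b := hamin b (h1 b hbB)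
      have h2' : b ≤ a := le_trans (hbmin b0 hb0B) hb0
      rw [le_antisymm h1' h2']

lemma pyGetD_toNat (xs : List Int) (i : Int) (h : 0 ≤ i) :
    PySem.List.pyGetD xs i 0 = xs.getD i.toNat 0 := by
  rw [show i = ((i.toNat : ℕ) : Int) by omega, PySem.List.pyGetD_natCast]
  rw [Int.toNat_natCast]

lemma mem_pvLA (prices : List Int) (x : Int) : x ∈ pvLA prices ↔ IsLoss prices x := by
  simp only [pvLA, List.mem_flatMap, List.mem_filterMap, PySem.List.mem_pyRange_one, IsLoss]
  constructor
  · rintro ⟨i, ⟨hi0, hin⟩, j, ⟨hij, hjn⟩, hsome⟩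
    split_ifs at hsome with hgt
    · have hx := Option.some.inj hsome
      refine ⟨i.toNat, j.toNat, by omega, by omega, ?_, ?_⟩
      · rw [← pyGetD_toNat _ _ (by omega), ← pyGetD_toNat _ _ (by omega)]; exact hgt
      · rw [← pyGetD_toNat _ _ (by omega), ← pyGetD_toNat _ _ (by omega)]
        exact hx.symm
  · rintro ⟨i, j, hij, hjn, hgt, rfl⟩
    refine ⟨(i : Int), ⟨by omega, by omega⟩, (j : Int), ⟨by omega, by omega⟩, ?_⟩
    rw [pyGetD_toNat _ _ (by omega), pyGetD_toNat _ _ (by omega)]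
    simp only [Int.toNat_natCast]
    rw [if_pos hgt]

lemma mem_pvEnumPairs (l : List Int) (k : Int) (a b : Int) :
    (a, b) ∈ pvEnumPairs l k ↔ ∃ i : ℕ, i < l.length ∧ l.getD i 0 = a ∧ b = k + i := by
  induction l generalizing k with
  | nil => simp [pvEnumPairs]
  | cons p rest ih =>
    simp only [pvEnumPairs, List.mem_cons, Prod.mk.injEq, ih, List.length_cons]
    constructor
    · rintro (⟨rfl, rfl⟩ | ⟨i, hi, hv, rfl⟩)
      · exact ⟨0, by omega, by simp, by omega⟩
      · exact ⟨i + 1, by omega, by simpa using hv, by push_cast; ring⟩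
    · rintro ⟨i, hi, hv, rfl⟩
      cases i with
      | zero => exact Or.inl ⟨by simpa using hv.symm, by omega⟩
      | succ i => exact Or.inr ⟨i, by omega, by simpa using hv, by push_cast; ring⟩

lemma pvEnumPairs_snd_ge (l : List Int) (k : Int) :
    ∀ x ∈ pvEnumPairs l k, k ≤ x.2 := by
  induction l generalizing k with
  | nil => simp [pvEnumPairs]
  | cons p rest ih =>
    rintro x hx
    rcases List.mem_cons.1 hx with h | h
    · simp [h]
    · have := ih (k + 1) x h
      omega

lemma pvEnumPairs_snd_lt (l : List Int) (k : Int) :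
    (pvEnumPairs l k).Pairwise (fun a b => a.2 < b.2) := by
  induction l generalizing k with
  | nil => exact List.Pairwise.nil
  | cons p rest ih =>
    refine List.Pairwise.cons (fun y hy => ?_) (ih (k + 1))
    have := pvEnumPairs_snd_ge rest (k + 1) y hy
    simp only
    omega

lemma pvLexLe_trans : ∀ (a b c : Int × Int), pvLexLe a b = true → pvLexLe b c = true → pvLexLe a c = true := by
  rintro ⟨a1, a2⟩ ⟨b1, b2⟩ ⟨c1, c2⟩ h1 h2
  simp only [pvLexLe, Bool.or_eq_true, Bool.and_eq_true, decide_eq_true_eq, beq_iff_eq] at *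
  omega

lemma pvLexLe_total : ∀ (a b : Int × Int), (pvLexLe a b || pvLexLe b a) = true := by
  rintro ⟨a1, a2⟩ ⟨b1, b2⟩
  simp only [pvLexLe, Bool.or_eq_true, Bool.and_eq_true, decide_eq_true_eq, beq_iff_eq]
  omega

lemma pvSp_hfst (prices : List Int) :
    ∀ (k l : ℕ) (hk : k < (pvSp prices).length) (hl : l < (pvSp prices).length), k < l →
      (pvSp prices)[k].1 < (pvSp prices)[l].1 ∨
        ((pvSp prices)[k].1 = (pvSp prices)[l].1 ∧ (pvSp prices)[k].2 ≤ (pvSp prices)[l].2) := by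
  have hpair : (pvSp prices).Pairwise (fun a b => pvLexLe a b = true) :=
    List.pairwise_mergeSort pvLexLe_trans pvLexLe_total _
  intro k l hk hl hkl
  have := (List.pairwise_iff_getElem.1 hpair) k l hk hl hkl
  simpa only [pvLexLe, Bool.or_eq_true, Bool.and_eq_true, decide_eq_true_eq, beq_iff_eq] using this

lemma pvSp_perm (prices : List Int) : (pvSp prices).Perm (pvEnumPairs prices 0) :=
  List.mergeSort_perm _ _

lemma pvSp_hne (prices : List Int) :
    ∀ (k l : ℕ) (hk : k < (pvSp prices).length) (hl : l < (pvSp prices).length), k < l →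
      (pvSp prices)[k].2 ≠ (pvSp prices)[l].2 := by
  have hnd : ((pvEnumPairs prices 0).map Prod.snd).Nodup := by
    show ((pvEnumPairs prices 0).map Prod.snd).Pairwise (· ≠ ·)
    rw [List.pairwise_map]
    exact (pvEnumPairs_snd_lt prices 0).imp (fun h => ne_of_lt h)
  have hnd2 : ((pvSp prices).map Prod.snd).Nodup :=
    (((pvSp_perm prices).map Prod.snd).nodup_iff).2 hnd
  intro k l hk hl hkl heq
  have hk' : k < ((pvSp prices).map Prod.snd).length := by simpa using hk
  have hl' : l < ((pvSp prices).map Prod.snd).length := by simpa using hl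
  have : ((pvSp prices).map Prod.snd)[k] = ((pvSp prices).map Prod.snd)[l] := by
    simpa using heq
  have := (List.Nodup.getElem_inj_iff hnd2).1 this
  omega

lemma pv_descent (sp : List (Int × Int))
    (hfst : ∀ (k l : ℕ) (hk : k < sp.length) (hl : l < sp.length), k < l →
      sp[k].1 < sp[l].1 ∨ (sp[k].1 = sp[l].1 ∧ sp[k].2 ≤ sp[l].2))
    (hne : ∀ (k l : ℕ) (hk : k < sp.length) (hl : l < sp.length), k < l → sp[k].2 ≠ sp[l].2) :
    ∀ (d k l : ℕ) (hk : k < sp.length) (hl : l < sp.length), k < l → l - k = d →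
      sp[k].1 < sp[l].1 → sp[l].2 < sp[k].2 →
      ∃ m, ∃ hm : m + 1 < sp.length,
        (sp[m]'(by omega)).1 < (sp[m + 1]'hm).1 ∧ (sp[m + 1]'hm).2 < (sp[m]'(by omega)).2 ∧
        (sp[m + 1]'hm).1 - (sp[m]'(by omega)).1 ≤ sp[l].1 - sp[k].1 := by
  intro d
  induction d with
  | zero => intro k l hk hl hkl hd; omega
  | succ e ih =>
    intro k l hk hl hkl hd hv hidx
    by_cases hadj : l = k + 1
    · subst hadj
      exact ⟨k, hl, hv, hidx, le_refl _⟩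
    · have hk1l : k + 1 < l := by omega
      have hk1 : k + 1 < sp.length := by omega
      have hkle : sp[k].1 ≤ sp[k + 1].1 := by
        rcases hfst k (k + 1) (by omega) hk1 (by omega) with h | ⟨h, _⟩ <;> omega
      rcases lt_trichotomy sp[k + 1].2 sp[l].2 with hu | hu | hu
      · have h1 : sp[k].1 < sp[k + 1].1 := by
          rcases hfst k (k + 1) (by omega) hk1 (by omega) with h | ⟨h, h2⟩
          · exact h
          · omega
        have h3 : sp[k + 1].1 ≤ sp[l].1 := by
          rcases hfst (k + 1) l hk1 hl hk1l with h | ⟨h, _⟩ <;> omega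
        exact ⟨k, hk1, h1, by omega, by omega⟩
      · exact absurd hu (hne (k + 1) l hk1 hl hk1l)
      · have h3 : sp[k + 1].1 < sp[l].1 := by
          rcases hfst (k + 1) l hk1 hl hk1l with h | ⟨h, h2⟩
          · exact h
          · omega
        obtain ⟨m, hm, a, b, c⟩ := ih (k + 1) l hk1 hl hk1l (by omega) h3 (by omega)
        exact ⟨m, hm, a, b, by omega⟩

lemma pv_zip_getElem (sp : List (Int × Int)) (m : ℕ) (hm : m + 1 < sp.length) :
    ∃ h : m < (sp.zip sp.tail).length,
      (sp.zip sp.tail)[m] = (sp[m]'(by omega), sp[m + 1]'hm) := by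
  have h : m < (sp.zip sp.tail).length := by
    simp only [List.length_zip, List.length_tail]
    omega
  refine ⟨h, ?_⟩
  rw [List.getElem_zip]
  congr 1
  rw [List.getElem_tail]

lemma pvLB_subset (prices : List Int) (x : Int) : x ∈ pvLB prices → IsLoss prices x := by
  intro hx
  simp only [pvLB, List.mem_filterMap] at hx
  obtain ⟨wv, hwv, hsome⟩ := hx
  split_ifs at hsome with hcond
  · simp only [Bool.and_eq_true, decide_eq_true_eq] at hcond
    have hx' : x = wv.2.1 - wv.1.1 := (Option.some.inj hsome).symm
    obtain ⟨w1, w2⟩ := wv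
    have hz := List.of_mem_zip hwv
    have h1 : w1 ∈ pvSp prices := hz.1
    have h2 : w2 ∈ pvSp prices := List.mem_of_mem_tail hz.2
    have h1' : w1 ∈ pvEnumPairs prices 0 := (pvSp_perm prices).mem_iff.1 h1
    have h2' : w2 ∈ pvEnumPairs prices 0 := (pvSp_perm prices).mem_iff.1 h2
    obtain ⟨pj, jx⟩ := w1
    obtain ⟨pi, ix⟩ := w2
    obtain ⟨j', hj', hjv, hjidx⟩ := (mem_pvEnumPairs prices 0 pj jx).1 h1'
    obtain ⟨i', hi', hiv, hiidx⟩ := (mem_pvEnumPairs prices 0 pi ix).1 h2'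
    refine ⟨i', j', ?_, hj', ?_, ?_⟩
    · have : (i' : Int) < (j' : Int) := by
        have h5 : ix < jx := hcond.2
        omega
      exact_mod_cast this
    · rw [hiv, hjv]; exact hcond.1
    · rw [hiv, hjv]; exact hx'

lemma pvLA_dominated (prices : List Int) (x : Int) :
    IsLoss prices x → ∃ y ∈ pvLB prices, y ≤ x := by
  rintro ⟨i, j, hij, hjn, hgt, rfl⟩
  have hin : i < prices.length := by omega
  have hmemi : (prices.getD i 0, (i : Int)) ∈ pvSp prices :=
    (pvSp_perm prices).mem_iff.2 ((mem_pvEnumPairs prices 0 _ _).2 ⟨i, hin, rfl, by omega⟩)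
  have hmemj : (prices.getD j 0, (j : Int)) ∈ pvSp prices :=
    (pvSp_perm prices).mem_iff.2 ((mem_pvEnumPairs prices 0 _ _).2 ⟨j, hjn, rfl, by omega⟩)
  obtain ⟨ki, hki, hkiv⟩ := List.mem_iff_getElem.1 hmemi
  obtain ⟨kj, hkj, hkjv⟩ := List.mem_iff_getElem.1 hmemj
  have hfst := pvSp_hfst prices
  have hvki1 : (pvSp prices)[ki].1 = prices.getD i 0 := by rw [hkiv]
  have hvki2 : (pvSp prices)[ki].2 = (i : Int) := by rw [hkiv]
  have hvkj1 : (pvSp prices)[kj].1 = prices.getD j 0 := by rw [hkjv]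
  have hvkj2 : (pvSp prices)[kj].2 = (j : Int) := by rw [hkjv]
  have hkjki : kj < ki := by
    rcases lt_trichotomy ki kj with h | h | h
    · rcases hfst ki kj hki hkj h with h' | ⟨h', _⟩ <;> omega
    · exfalso; subst h; omega
    · exact h
  obtain ⟨m, hm, ha, hb, hc⟩ := pv_descent (pvSp prices) hfst (pvSp_hne prices)
    (ki - kj) kj ki hkj hki hkjki rfl (by omega) (by
      rw [hvki2, hvkj2]; exact_mod_cast hij)
  obtain ⟨hzl, hzv⟩ := pv_zip_getElem (pvSp prices) m hm
  have hmlt : m < (pvSp prices).length := by omega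
  refine ⟨((pvSp prices)[m + 1]'hm).1 - ((pvSp prices)[m]'hmlt).1, ?_, by omega⟩
  simp only [pvLB, List.mem_filterMap]
  refine ⟨((pvSp prices)[m]'hmlt, (pvSp prices)[m + 1]'hm), ?_, ?_⟩
  · rw [← hzv]; exact List.getElem_mem hzl
  · have hcond : ((decide (((pvSp prices)[m + 1]'hm).1 > ((pvSp prices)[m]'hmlt).1)) &&
        (decide (((pvSp prices)[m + 1]'hm).2 < ((pvSp prices)[m]'hmlt).2))) = true := by
      simp only [Bool.and_eq_true, decide_eq_true_eq]
      exact ⟨ha, hb⟩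
    rw [if_pos hcond]

-- ===== VERDICT (by name: the statement is the Claim_ definition above) =====
theorem minimize_loss_spec : Claim_equal_minimize_loss := by
  intro prices _
  show minimize_loss prices = minimize_loss_alt prices
  rw [minimize_loss_eq, minimize_loss_alt_eq, pvOptMin_eq_min?, pvOptMin_eq_min?,
    pv_min?_congr (pvLA prices) (pvLB prices)
      (fun b hb => (mem_pvLA prices b).2 (pvLB_subset prices b hb))
      (fun a ha => pvLA_dominated prices a ((mem_pvLA prices a).1 ha))]
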